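-- pv_equiv track=rewrite | github.com/doomnonius/advent-of-code | 2017/day09.py | part1
-- ===== SOURCE A (Python) =====
-- def part1(inp: str) -> int:
-- 	i = 0
-- 	score = 0
-- 	retVal = 0
-- 	open_angle = False
-- 	while i < len(inp):
-- 		char = inp[i]
-- 		if not open_angle:
-- 			if char == "{":
-- 				score += 1
-- 			elif char == "<":
-- 				open_angle = True
-- 			elif char == "}":
-- 				retVal += score
-- 				score -= 1
-- 		else:
-- 			if char == ">":
-- 				open_angle = False
-- 			elif char == "!":
-- 				i += 1
-- 		i += 1
-- 	return retVal
-- ===== SOURCE B (Python) =====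
-- def part1(inp: str) -> int:
--     # pass 1: strip garbage, keep only real braces
--     braces = []
--     it = iter(inp)
--     in_garbage = False
--     for ch in it:
--         if in_garbage:
--             if ch == '>':
--                 in_garbage = False
--             elif ch == '!':
--                 next(it, None)
--         else:
--             if ch == '<':
--                 in_garbage = True
--             elif ch == '{' or ch == '}':
--                 braces.append(ch)
--     # pass 2: score the braces (add depth on close, then decrement)
--     depth = 0
--     total = 0
--     for b in braces:
--         if b == '{':
--             depth += 1
--         else:
--             total += depth
--             depth -= 1
--     return total
-- ===== Notes on version B (the rewrite author's own statement) =====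
-- stated objective: alternative
-- what changed: Splits A's single interleaved state machine into two passes: one that strips garbage producing only the real braces, and a separate depth-counting scan over that cleaned list (iterator loops instead of manual index stepping).
import Mathlib
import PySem

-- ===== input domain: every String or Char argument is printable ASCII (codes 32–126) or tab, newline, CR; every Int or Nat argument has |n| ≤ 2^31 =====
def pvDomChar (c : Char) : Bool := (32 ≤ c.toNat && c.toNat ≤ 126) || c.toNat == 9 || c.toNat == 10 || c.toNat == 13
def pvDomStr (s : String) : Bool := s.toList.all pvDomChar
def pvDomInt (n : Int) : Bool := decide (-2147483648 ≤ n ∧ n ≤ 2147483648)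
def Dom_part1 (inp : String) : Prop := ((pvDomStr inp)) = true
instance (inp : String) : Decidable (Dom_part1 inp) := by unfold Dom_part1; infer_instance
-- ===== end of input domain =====

-- B replaces A's single interleaved state machine by two passes (strip garbage, then score the braces): alternative decomposition, same cost.

-- ===== PORT A =====
-- A's while loop: i advances by 1 each step, plus one extra on '!' inside garbage (rest.tail).
def part1Go : List Char → Bool → Int → Int → Int
  | [], _, _, retVal => retVal
  | c :: rest, openAngle, score, retVal =>
    if !openAngle then
      if c = '{' then part1Go rest openAngle (score + 1) retVal
      else if c = '<' then part1Go rest true score retVal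
      else if c = '}' then part1Go rest openAngle (score - 1) (retVal + score)
      else part1Go rest openAngle score retVal
    else
      if c = '>' then part1Go rest false score retVal
      else if c = '!' then part1Go rest.tail openAngle score retVal
      else part1Go rest openAngle score retVal
termination_by l => l.length
decreasing_by all_goals (simp [List.length_tail]; try omega)

def part1 (inp : String) : Int := part1Go inp.toList false 0 0

-- ===== PORT B =====
-- pass 1 of Source B: keep only the braces outside garbage ('!' skips the next char)
def stripGo : List Char → Bool → List Char
  | [], _ => []
  | c :: rest, true =>
    if c = '>' then stripGo rest false
    else if c = '!' then stripGo rest.tail true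
    else stripGo rest true
  | c :: rest, false =>
    if c = '<' then stripGo rest true
    else if c = '{' ∨ c = '}' then c :: stripGo rest false
    else stripGo rest false
termination_by l => l.length
decreasing_by all_goals (simp [List.length_tail]; try omega)

-- pass 2 of Source B: depth counter, add-on-close
def scoreGo : List Char → Int → Int → Int
  | [], _, total => total
  | b :: rest, depth, total =>
    if b = '{' then scoreGo rest (depth + 1) total
    else scoreGo rest (depth - 1) (total + depth)

def part1_alt (inp : String) : Int := scoreGo (stripGo inp.toList false) 0 0

-- ===== PRECONDITION & SPEC =====
def Spec_part1 (inp : String) (out : Int) : Prop := out = part1_alt inp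
instance (inp : String) (out : Int) : Decidable (Spec_part1 inp out) := by unfold Spec_part1; infer_instance

-- ===== CLAIM (what is proved, stated in full; the proofs are below) =====
def Claim_equal_part1 : Prop := ∀ (inp : String), Dom_part1 inp → Spec_part1 inp (part1 inp)

-- ===== LEMMAS AND PROOFS =====
-- Fusing B's two passes reproduces A's loop, for any state.
theorem part1Go_eq_scoreGo_stripGo (l : List Char) (g : Bool) (s r : Int) :
    part1Go l g s r = scoreGo (stripGo l g) s r := by
  fun_induction part1Go l g s r <;> simp_all [stripGo, scoreGo]

-- ===== VERDICT (by name: the statement is the Claim_ definition above) =====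
theorem part1_spec : Claim_equal_part1 := by
  intro inp _
  unfold Spec_part1 part1 part1_alt
  exact part1Go_eq_scoreGo_stripGo _ _ _ _
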